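-- pv_equiv track=rewrite | github.com/songsongha/adventOfCode | 2025/Day 2/solutions.py | check_for_match
-- ===== SOURCE A (Python) =====
-- def check_for_match(id:int):
--     id_str = str(id)
--     length = len(id_str)
--     if length % 2 != 0:
--         return False
--     halfway_index = length//2
--     for i in range(halfway_index):
--         if id_str[i] != id_str[halfway_index+i]:
--             return False
--     return True
-- ===== SOURCE B (Python) =====
-- def check_for_match(id: int):
--     s = str(id)
--     if len(s) % 2 != 0:
--         return False
--     p = 10 ** (len(s) // 2)
--     return id // p == id % p
-- ===== Notes on version B (the rewrite author's own statement) =====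
-- stated objective: alternative
-- what changed: Replaces the digit-by-digit early-exit loop over the string with a single arithmetic comparison of the quotient and remainder of id by the power of ten at half the decimal length, using that the top half of an even-length representation has no leading zero.
import Mathlib
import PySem

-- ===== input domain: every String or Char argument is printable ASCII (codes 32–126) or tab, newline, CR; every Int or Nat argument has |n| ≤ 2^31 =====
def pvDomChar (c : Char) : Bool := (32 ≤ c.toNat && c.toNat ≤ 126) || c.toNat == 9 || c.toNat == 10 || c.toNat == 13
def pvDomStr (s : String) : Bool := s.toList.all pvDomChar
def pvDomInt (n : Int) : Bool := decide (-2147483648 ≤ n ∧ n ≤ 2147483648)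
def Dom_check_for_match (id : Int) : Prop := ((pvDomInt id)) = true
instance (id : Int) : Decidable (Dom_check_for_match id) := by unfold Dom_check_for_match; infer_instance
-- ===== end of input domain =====

-- B replaces A's digit-by-digit early-exit loop over str(id) with a single arithmetic comparison of the two numeric halves via quotient/remainder by the power of ten at half the decimal length; alternative decomposition, same asymptotic cost.

-- ===== PORT A =====
-- the for-loop over range(halfway_index) with its early `return False`
def pvLoopA (s : List Char) (half : Int) : List Int → Bool
  | [] => true
  | i :: rest =>
    if PySem.List.pyGetD s i ' ' ≠ PySem.List.pyGetD s (half + i) ' ' then false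
    else pvLoopA s half rest
def check_for_match (id : Int) : Bool :=
  let id_str := PySem.Int.toChars id
  let length : Int := id_str.length
  if PySem.Int.mod length 2 ≠ 0 then false
  else
    let halfway_index := PySem.Int.floordiv length 2
    pvLoopA id_str halfway_index (PySem.List.pyRange 0 halfway_index 1)
-- ===== PORT B =====
def check_for_match_alt (id : Int) : Bool :=
  let s := PySem.Int.toChars id
  if PySem.Int.mod (s.length : Int) 2 ≠ 0 then false
  else
    let p : Int := 10 ^ (PySem.Int.floordiv (s.length : Int) 2).toNat
    PySem.Int.floordiv id p == PySem.Int.mod id p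

-- ===== PRECONDITION & SPEC =====
def Spec_check_for_match (id : Int) (out : Bool) : Prop := out = check_for_match_alt id
instance (id : Int) (out : Bool) : Decidable (Spec_check_for_match id out) := by unfold Spec_check_for_match; infer_instance

-- ===== CLAIM (what is proved, stated in full; the proofs are below) =====
def Claim_equal_check_for_match : Prop := ∀ (id : Int), Dom_check_for_match id → Spec_check_for_match id (check_for_match id)

-- ===== LEMMAS AND PROOFS =====

-- Nat.toDigits via Mathlib's little-endian Nat.digits
theorem pv_toDigitsCore_eq (f : ℕ) : ∀ (n : ℕ) (l : List Char), 0 < n → n < f →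
    Nat.toDigitsCore 10 f n l = ((Nat.digits 10 n).map Nat.digitChar).reverse ++ l := by
  induction f with
  | zero => intro n l hn hf; omega
  | succ f ih =>
    intro n l hn hf
    rw [Nat.digits_def' (by norm_num) hn]
    simp only [Nat.toDigitsCore]
    by_cases h : n / 10 = 0
    · simp [h]
    · rw [if_neg h, ih (n / 10) _ (Nat.pos_of_ne_zero h) (by omega)]
      simp

theorem pv_toDigits10 {n : ℕ} (hn : 0 < n) :
    Nat.toDigits 10 n = ((Nat.digits 10 n).map Nat.digitChar).reverse := by
  rw [Nat.toDigits, pv_toDigitsCore_eq (n + 1) n [] hn (by omega), List.append_nil]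

theorem pv_digitChar_inj : ∀ a < 10, ∀ b < 10, Nat.digitChar a = Nat.digitChar b → a = b := by decide

theorem pv_digitChar_ne_dash : ∀ a < 10, Nat.digitChar a ≠ '-' := by decide

theorem pv_idx {α : Type} (l : List α) {i j : ℕ} (e : i = j) (h1 : i < l.length) :
    l[i] = l[j]'(e ▸ h1) := by subst e; rfl

theorem pv_core (m h : ℕ) (_hm : 0 < m) (hL : (Nat.digits 10 m).length = 2 * h) :
    ((List.range h).all fun i =>
        (((Nat.digits 10 m).map Nat.digitChar).reverse.getD i ' ' ==
         ((Nat.digits 10 m).map Nat.digitChar).reverse.getD (h + i) ' '))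
      = decide (m / 10 ^ h = m % 10 ^ h) := by
  set d := Nat.digits 10 m with hd
  have hdl : d.length = 2 * h := hL
  have hdig : ∀ k (hk : k < d.length), d[k] < 10 := fun k hk =>
    Nat.digits_lt_base (by norm_num) (List.getElem_mem hk)
  have hs : ∀ k (hk : k < 2 * h), ((d.map Nat.digitChar).reverse).getD k ' '
      = Nat.digitChar (d[2 * h - 1 - k]'(by omega)) := by
    intro k hk
    rw [List.getD_eq_getElem _ _ (by simp [hdl]; omega), List.getElem_reverse]
    simp only [List.getElem_map, List.length_map]
    exact congrArg Nat.digitChar (pv_idx d (by omega) _)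
  apply Bool.eq_iff_iff.mpr
  simp only [List.all_eq_true, List.mem_range, beq_iff_eq, decide_eq_true_eq]
  have key : (∀ i < h, ((d.map Nat.digitChar).reverse).getD i ' '
        = ((d.map Nat.digitChar).reverse).getD (h + i) ' ')
      ↔ List.take h d = List.drop h d := by
    constructor
    · intro hc
      apply List.ext_getElem (by simp [hdl]; omega)
      intro j h1 h2
      have hj : j < h := by simp [hdl] at h1; omega
      have hcc := hc (h - 1 - j) (by omega)
      rw [hs _ (by omega), hs _ (by omega),
        pv_idx d (show 2*h-1-(h-1-j) = h + j by omega) (by omega),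
        pv_idx d (show 2*h-1-(h+(h-1-j)) = j by omega) (by omega)] at hcc
      rw [List.getElem_take, List.getElem_drop]
      exact (pv_digitChar_inj _ (hdig _ (by omega)) _ (hdig _ (by omega)) hcc).symm
    · intro ht i hi
      rw [hs _ (by omega), hs _ (by omega),
        pv_idx d (show 2*h-1-i = h + (h-1-i) by omega) (by omega),
        pv_idx d (show 2*h-1-(h+i) = h-1-i by omega) (by omega)]
      congr 1
      have hgd := congrArg (fun l => l.getD (h - 1 - i) 0) ht
      simp only [List.getD] at hgd
      rw [List.getElem?_take, List.getElem?_drop, if_pos (show h-1-i < h by omega),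
        List.getElem?_eq_getElem (by omega), List.getElem?_eq_getElem (by omega)] at hgd
      simpa using hgd.symm
  rw [key, Nat.self_div_pow_eq_ofDigits_drop h m (by norm_num),
      Nat.self_mod_pow_eq_ofDigits_take h m (by norm_num), ← hd]
  constructor
  · intro ht; rw [ht]
  · intro hof
    have := Nat.ofDigits_inj_of_len_eq (b := 10) (by norm_num)
      (L1 := List.drop h d) (L2 := List.take h d)
      (by simp only [List.length_take, List.length_drop, hdl]; omega)
      (fun l hl => Nat.digits_lt_base (by norm_num) (List.mem_of_mem_drop hl))
      (fun l hl => Nat.digits_lt_base (by norm_num) (List.mem_of_mem_take hl)) hof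
    exact this.symm

theorem pv_loopA_eq_all (s : List Char) (half : Int) (l : List Int) :
    pvLoopA s half l = l.all (fun i => PySem.List.pyGetD s i ' ' == PySem.List.pyGetD s (half + i) ' ') := by
  induction l with
  | nil => rfl
  | cons i rest ih =>
    by_cases h : PySem.List.pyGetD s i ' ' = PySem.List.pyGetD s (half + i) ' '
    · simp [pvLoopA, h, ih]
    · simp [pvLoopA, h]


theorem pv_beq_natCast (a b : ℕ) : (((a : Int)) == ((b : Int))) = decide (a = b) := by
  rw [Bool.eq_iff_iff]; simp

theorem pv_main (id : Int) : check_for_match id = check_for_match_alt id := by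
  have hA : check_for_match id =
      (if PySem.Int.mod ((PySem.Int.toChars id).length : Int) 2 ≠ 0 then false
       else pvLoopA (PySem.Int.toChars id)
         (PySem.Int.floordiv ((PySem.Int.toChars id).length : Int) 2)
         (PySem.List.pyRange 0 (PySem.Int.floordiv ((PySem.Int.toChars id).length : Int) 2) 1)) := rfl
  have hB : check_for_match_alt id =
      (if PySem.Int.mod ((PySem.Int.toChars id).length : Int) 2 ≠ 0 then false
       else (PySem.Int.floordiv id (10 ^ (PySem.Int.floordiv ((PySem.Int.toChars id).length : Int) 2).toNat)
             == PySem.Int.mod id (10 ^ (PySem.Int.floordiv ((PySem.Int.toChars id).length : Int) 2).toNat))) := rfl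
  rw [hA, hB]
  have hmod : PySem.Int.mod (((PySem.Int.toChars id).length : ℕ) : Int) 2
      = (((PySem.Int.toChars id).length % 2 : ℕ) : Int) := by
    exact_mod_cast PySem.Int.mod_natCast (PySem.Int.toChars id).length 2
  have hdiv : PySem.Int.floordiv (((PySem.Int.toChars id).length : ℕ) : Int) 2
      = (((PySem.Int.toChars id).length / 2 : ℕ) : Int) := by
    exact_mod_cast PySem.Int.floordiv_natCast (PySem.Int.toChars id).length 2
  rw [hmod, hdiv]
  by_cases hpar : (PySem.Int.toChars id).length % 2 = 0
  · rw [if_neg (by exact_mod_cast (by simp [hpar] : ¬((((PySem.Int.toChars id).length % 2 : ℕ) : Int) ≠ 0) )), if_neg (by exact_mod_cast (by simp [hpar] : ¬((((PySem.Int.toChars id).length % 2 : ℕ) : Int) ≠ 0))), Int.toNat_natCast]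
    set L := (PySem.Int.toChars id).length with hLdef
    set h := L / 2 with hh
    rcases Int.lt_or_le id 0 with hneg | hpos
    · -- id < 0 : '-' never matches a digit, and floordiv < 0 ≤ mod
      have hs : PySem.Int.toChars id = '-' :: Nat.toDigits 10 id.natAbs := by
        simp [PySem.Int.toChars, hneg]
      have habs : 0 < id.natAbs := by omega
      set t := Nat.toDigits 10 id.natAbs with htdef
      have htchars : ∀ c ∈ t, c ≠ '-' := by
        intro c hc
        rw [htdef, pv_toDigits10 habs, List.mem_reverse, List.mem_map] at hc
        obtain ⟨a, ha, rfl⟩ := hc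
        exact pv_digitChar_ne_dash a (Nat.digits_lt_base (by norm_num) ha)
      have hLt : L = t.length + 1 := by rw [hLdef, hs]; rfl
      have hL2 : 2 ≤ L := by omega
      have hhb : 1 ≤ h ∧ h ≤ t.length := by omega
      have hLHS : pvLoopA (PySem.Int.toChars id) ((h : ℕ) : Int)
          (PySem.List.pyRange 0 ((h : ℕ) : Int) 1) = false := by
        rw [pv_loopA_eq_all]
        apply List.all_eq_false.mpr
        refine ⟨0, ?_, ?_⟩
        · rw [PySem.List.pyRange_zero_natCast]
          exact List.mem_map.mpr ⟨0, List.mem_range.mpr (by omega), rfl⟩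
        · simp only [add_zero, Bool.not_eq_true, beq_eq_false_iff_ne, ne_eq]
          rw [hs]
          rw [show ((0:Int)) = ((0:ℕ):Int) from rfl, PySem.List.pyGetD_natCast,
            PySem.List.pyGetD_natCast]
          obtain ⟨k, hk⟩ : ∃ k, h = k + 1 := ⟨h - 1, by omega⟩
          rw [hk]
          simp only [List.getD_cons_zero, List.getD_cons_succ]
          have hkt : k < t.length := by omega
          rw [List.getD_eq_getElem _ _ hkt]
          exact fun e => htchars _ (List.getElem_mem hkt) e.symm
      have hp : (0:Int) < 10 ^ h := pow_pos (by norm_num) h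
      have hRHS : (PySem.Int.floordiv id (10 ^ h) == PySem.Int.mod id (10 ^ h)) = false := by
        apply beq_eq_false_iff_ne.mpr
        apply ne_of_lt
        calc PySem.Int.floordiv id (10 ^ h) = id / 10 ^ h := PySem.Int.floordiv_eq_ediv_of_pos hp
          _ < 0 := Int.ediv_neg_of_neg_of_pos hneg hp
          _ ≤ PySem.Int.mod id (10 ^ h) := PySem.Int.mod_nonneg id hp
      rw [hLHS, hRHS]
    · -- 0 ≤ id
      obtain ⟨m, rfl⟩ : ∃ m : ℕ, id = (m : Int) := ⟨id.toNat, (Int.toNat_of_nonneg hpos).symm⟩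
      have hs0 : PySem.Int.toChars (m : Int) = Nat.toDigits 10 m := by
        simp [PySem.Int.toChars, not_lt.mpr hpos]
      rcases Nat.eq_zero_or_pos m with rfl | hm
      · exact absurd hpar (by rw [hLdef, hs0]; decide)
      have hsd : PySem.Int.toChars (m : Int) = ((Nat.digits 10 m).map Nat.digitChar).reverse := by
        rw [hs0, pv_toDigits10 hm]
      have hL : (Nat.digits 10 m).length = 2 * h := by
        have : L = (Nat.digits 10 m).length := by rw [hLdef, hsd]; simp
        omega
      have hLHS : pvLoopA (PySem.Int.toChars (m : Int)) ((h : ℕ) : Int)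
          (PySem.List.pyRange 0 ((h : ℕ) : Int) 1)
          = ((List.range h).all fun i =>
              (((Nat.digits 10 m).map Nat.digitChar).reverse.getD i ' ' ==
               ((Nat.digits 10 m).map Nat.digitChar).reverse.getD (h + i) ' ')) := by
        rw [pv_loopA_eq_all, PySem.List.pyRange_zero_natCast, List.all_map, hsd]
        simp only [Function.comp_def, PySem.List.pyGetD_natCast, ← Nat.cast_add,
          List.getD_eq_getElem?_getD]
      rw [hLHS, pv_core m h hm hL]
      have hpow : ((10:Int) ^ h) = (((10 ^ h : ℕ)) : Int) := by push_cast; ring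
      rw [hpow, PySem.Int.floordiv_natCast, PySem.Int.mod_natCast, pv_beq_natCast]
  · rw [if_pos (show ((((PySem.Int.toChars id).length % 2 : ℕ) : Int)) ≠ 0 by exact_mod_cast hpar), if_pos (show ((((PySem.Int.toChars id).length % 2 : ℕ) : Int)) ≠ 0 by exact_mod_cast hpar)]

-- ===== VERDICT (by name: the statement is the Claim_ definition above) =====
theorem check_for_match_spec : Claim_equal_check_for_match := by
  intro id _
  unfold Spec_check_for_match
  exact pv_main id
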